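-- pv_equiv track=rewrite | github.com/chungeun-choi/algorithms | studygroup/2week/2week_secretmap.py | solution
-- ===== SOURCE A (Python) =====
-- def solution(n, arr1, arr2):
--     answer = []
--     new_byte_array = list(zip(arr1, arr2))
--     and_byte_array = list(map(lambda x: bin(x[0] | x[1]), new_byte_array))
--
--     for cnt in range(0, n):
--         value = and_byte_array[cnt]
--
--         value = value.replace("0b", "")
--         value = value.rjust(n, "0")
--         value = value.replace("1", "#").replace("0", " ")
--
--         answer.append(value)
--
--     return answer
-- ===== SOURCE B (Python) =====
-- def render(v):
--     """Characters of v's binary form, drawing 1-bits as '#' and 0-bits as ' '."""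
--     if v < 0:
--         return '-' + render(-v)
--     if v < 2:
--         return '#' if v else ' '
--     return render(v // 2) + ('#' if v & 1 else ' ')
--
--
-- def solution(n, arr1, arr2):
--     rows = []
--     for i in range(n):
--         row = render(arr1[i] | arr2[i])
--         rows.append(' ' * (n - len(row)) + row)
--     return rows
-- ===== Notes on version B (the rewrite author's own statement) =====
-- stated objective: alternative
-- what changed: Each row is produced by a recursive renderer that emits '#'/' ' characters directly from the value's bits (halving recursion, sign clause for negatives) and space-pads to n, replacing A's bin()-string pipeline of replace('0b')/rjust('0')/replace/replace; Pre_ only excludes n beyond either array length, where A raises IndexError (B raises IndexError there too).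
import Mathlib
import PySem

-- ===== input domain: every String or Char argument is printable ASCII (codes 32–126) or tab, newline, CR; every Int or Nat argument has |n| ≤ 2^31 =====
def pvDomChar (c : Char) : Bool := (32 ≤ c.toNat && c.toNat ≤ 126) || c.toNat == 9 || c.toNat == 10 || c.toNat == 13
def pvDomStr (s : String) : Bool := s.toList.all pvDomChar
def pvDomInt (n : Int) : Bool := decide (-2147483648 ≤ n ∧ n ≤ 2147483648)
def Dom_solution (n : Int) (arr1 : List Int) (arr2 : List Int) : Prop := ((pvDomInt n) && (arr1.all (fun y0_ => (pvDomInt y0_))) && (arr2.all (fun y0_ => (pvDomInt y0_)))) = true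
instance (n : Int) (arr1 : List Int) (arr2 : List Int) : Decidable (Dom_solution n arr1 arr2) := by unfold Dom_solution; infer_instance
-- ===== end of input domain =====

-- B renders each row by a recursive halving renderer that emits '#'/' ' characters directly
-- from the value's bits, instead of A's bin()-string pipeline of replace/rjust/replace;
-- alternative decomposition, same asymptotic cost.

-- ===== PORT A =====
-- str.rjust(w, c): left-pad with c up to width w, never truncates (exact hand port).
def pyRjust (s : String) (w : Int) (c : Char) : String :=
  String.ofList (List.replicate (w.toNat - s.toList.length) c ++ s.toList)

def solution (n : Int) (arr1 : List Int) (arr2 : List Int) : List String :=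
  let new_byte_array := List.zip arr1 arr2
  let and_byte_array := new_byte_array.map (fun x => PySem.Int.pyBin (PySem.Int.bor x.1 x.2))
  (PySem.List.pyRange 0 n 1).foldl (fun answer cnt =>
    let value := PySem.List.pyGetD and_byte_array cnt ""  -- IndexError excluded by Pre_
    let value := PySem.Str.replace value "0b" ""
    let value := pyRjust value n '0'
    let value := PySem.Str.replace (PySem.Str.replace value "1" "#") "0" " "
    answer ++ [value]) []

-- ===== PORT B =====
-- Source B's render(v): the characters of v's binary form, 1-bits as '#', 0-bits as ' '
def renderB (v : Int) : List Char :=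
  if v < 0 then '-' :: renderB (-v)
  else if v < 2 then [if v ≠ 0 then '#' else ' ']
  else renderB (PySem.Int.floordiv v 2) ++ [if PySem.Int.band v 1 = 1 then '#' else ' ']
termination_by 2 * v.natAbs + (if v < 0 then 1 else 0)
decreasing_by
  · rw [if_pos (by omega : v < 0), if_neg (by omega : ¬ (-v < 0))]
    omega
  · rw [PySem.Int.floordiv_eq_ediv_of_pos (by omega)]
    rw [if_neg (by omega : ¬ (v < 0)), if_neg (by omega : ¬ (v / 2 < 0))]
    omega

def solution_alt (n : Int) (arr1 : List Int) (arr2 : List Int) : List String :=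
  (PySem.List.pyRange 0 n 1).foldl (fun rows i =>
    let row := renderB (PySem.Int.bor (PySem.List.pyGetD arr1 i 0) (PySem.List.pyGetD arr2 i 0))
    rows ++ [String.ofList (List.replicate (n - (row.length : Int)).toNat ' ' ++ row)]) []

-- ===== PRECONDITION & SPEC =====
-- Pre_ excludes only n beyond either array length, where A raises IndexError (B does too).
def Pre_solution (n : Int) (arr1 : List Int) (arr2 : List Int) : Prop :=
  n ≤ (arr1.length : Int) ∧ n ≤ (arr2.length : Int)
instance (n : Int) (arr1 : List Int) (arr2 : List Int) : Decidable (Pre_solution n arr1 arr2) := by unfold Pre_solution; infer_instance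
def pvWitness_solution : Int × List Int × List Int := (2, ([9, 20], [30, 1]))

def Spec_solution (n : Int) (arr1 : List Int) (arr2 : List Int) (out : List String) : Prop := out = solution_alt n arr1 arr2
instance (n : Int) (arr1 : List Int) (arr2 : List Int) (out : List String) : Decidable (Spec_solution n arr1 arr2 out) := by unfold Spec_solution; infer_instance

-- ===== CLAIM (what is proved, stated in full; the proofs are below) =====
def Claim_equal_solution : Prop := ∀ (n : Int) (arr1 : List Int) (arr2 : List Int), Dom_solution n arr1 arr2 → Pre_solution n arr1 arr2 → Spec_solution n arr1 arr2 (solution n arr1 arr2)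

-- ===== LEMMAS AND PROOFS =====

-- clean recursion computing Chars.replace (for a nonempty pattern)
def replSpec (old new : List Char) : List Char → List Char
  | [] => []
  | c :: t =>
    if h : old.isPrefixOf (c :: t) ∧ old ≠ [] then new ++ replSpec old new ((c :: t).drop old.length)
    else c :: replSpec old new t
termination_by l => l.length
decreasing_by
  · have : 1 ≤ old.length := by
      cases old with
      | nil => exact absurd rfl h.2
      | cons _ _ => simp
    simp [List.length_drop]; omega
  · simp

theorem replace_go_eq (old new : List Char) (hold : old ≠ []) :
    ∀ (fuel : Nat) (l acc : List Char), l.length ≤ fuel →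
      PySem.Chars.replace.go old new fuel l acc = acc.reverse ++ replSpec old new l := by
  intro fuel
  induction fuel with
  | zero =>
    intro l acc hl
    have hnil : l = [] := List.eq_nil_of_length_eq_zero (by omega)
    subst hnil
    simp [PySem.Chars.replace.go, replSpec]
  | succ f ih =>
    intro l acc hl
    cases l with
    | nil => simp [PySem.Chars.replace.go, replSpec]
    | cons c t =>
      have hlen1 : 1 ≤ old.length := by
        cases old with
        | nil => exact absurd rfl hold
        | cons _ _ => simp
      by_cases hp : old.isPrefixOf (c :: t) = true
      · have hgo : PySem.Chars.replace.go old new (f+1) (c::t) acc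
            = PySem.Chars.replace.go old new f ((c::t).drop old.length) (new.reverse ++ acc) := by
          simp [PySem.Chars.replace.go, hp]
        rw [hgo, ih _ _ (by simp at hl ⊢; omega)]
        rw [replSpec, dif_pos ⟨hp, hold⟩]
        simp
      · have hgo : PySem.Chars.replace.go old new (f+1) (c::t) acc
            = PySem.Chars.replace.go old new f t (c :: acc) := by
          simp [PySem.Chars.replace.go, hp]
        rw [hgo, ih _ _ (by simp at hl ⊢; omega)]
        rw [replSpec, dif_neg (by simp [hp])]
        simp

theorem replace_eq_replSpec (s old new : List Char) (hold : old ≠ []) :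
    PySem.Chars.replace s old new = replSpec old new s := by
  have he : old.isEmpty = false := by cases old with
    | nil => exact absurd rfl hold
    | cons _ _ => simp
  rw [PySem.Chars.replace, he]
  simpa using replace_go_eq old new hold s.length s [] le_rfl

theorem replSpec_of_not_infix (old new l : List Char) (h : ¬ old <:+: l) :
    replSpec old new l = l := by
  induction l with
  | nil => simp [replSpec]
  | cons c t ih =>
    rw [replSpec, dif_neg]
    · rw [ih (fun hi => h (hi.trans (List.suffix_cons c t).isInfix))]
    · rintro ⟨hp, -⟩
      exact h ((List.isPrefixOf_iff_prefix.mp hp).isInfix)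

theorem replSpec_single (a b : Char) (l : List Char) :
    replSpec [a] [b] l = l.map (fun c => if c = a then b else c) := by
  induction l with
  | nil => simp [replSpec]
  | cons c t ih =>
    by_cases hc : c = a
    · subst hc
      rw [replSpec, dif_pos (by simp [List.isPrefixOf])]
      simp [ih]
    · rw [replSpec, dif_neg (by simp [List.isPrefixOf, Ne.symm hc])]
      simp [hc, ih]

-- MSB-first binary digit characters, matching Nat.toDigits 2
def binChars (n : Nat) : List Char :=
  if h : n < 2 then [Nat.digitChar n]
  else binChars (n / 2) ++ [Nat.digitChar (n % 2)]
decreasing_by exact Nat.div_lt_self (by omega) (by omega)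

theorem toDigitsCore_acc (b : Nat) :
    ∀ (f n : Nat) (acc : List Char),
      Nat.toDigitsCore b f n acc = Nat.toDigitsCore b f n [] ++ acc := by
  intro f
  induction f with
  | zero => intro n acc; simp [Nat.toDigitsCore]
  | succ f ih =>
    intro n acc
    simp only [Nat.toDigitsCore]
    by_cases hq : n / b = 0
    · simp [hq]
    · simp only [hq, if_false]
      rw [ih (n / b) (Nat.digitChar (n % b) :: acc), ih (n / b) [Nat.digitChar (n % b)]]
      simp

theorem toDigitsCore_eq_binChars : ∀ (n f : Nat), n < f →
    Nat.toDigitsCore 2 f n [] = binChars n := by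
  intro n
  induction n using Nat.strong_induction_on with
  | _ n ih =>
    intro f hf
    cases f with
    | zero => omega
    | succ f =>
      simp only [Nat.toDigitsCore]
      by_cases h2 : n < 2
      · have hq : n / 2 = 0 := by omega
        have hm : n % 2 = n := by omega
        rw [binChars, dif_pos h2]
        simp [hq, hm]
      · have hq : n / 2 ≠ 0 := by omega
        simp only [hq, if_false]
        rw [toDigitsCore_acc, ih (n / 2) (by omega) f (by omega)]
        conv_rhs => rw [binChars, dif_neg h2]

theorem toDigits_eq_binChars (n : Nat) : Nat.toDigits 2 n = binChars n := by
  exact toDigitsCore_eq_binChars n (n + 1) (by omega)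

theorem mem_binChars (n : Nat) (c : Char) (h : c ∈ binChars n) : c = '0' ∨ c = '1' := by
  induction n using binChars.induct with
  | case1 n h2 =>
    rw [binChars, dif_pos h2] at h
    interval_cases n
    · simp at h; simp [h, Nat.digitChar]
    · simp at h; simp [h, Nat.digitChar]
  | case2 n h2 ih =>
    rw [binChars, dif_neg h2] at h
    rcases List.mem_append.mp h with h' | h'
    · exact ih h'
    · simp at h'
      have : n % 2 = 0 ∨ n % 2 = 1 := by omega
      rcases this with h0 | h0 <;> simp [h', h0, Nat.digitChar]

def renderChar (c : Char) : Char := if c = '0' then ' ' else if c = '1' then '#' else c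

theorem render_comp (c : Char) :
    (if (if c = '1' then '#' else c) = '0' then ' ' else if c = '1' then '#' else c)
      = renderChar c := by
  by_cases h0 : c = '0' <;> by_cases h1 : c = '1' <;> simp_all [renderChar]

theorem no_b_infix (m : Nat) : ¬ (['0', 'b'] <:+: Nat.toDigits 2 m) := by
  intro h
  have hb : 'b' ∈ Nat.toDigits 2 m := h.subset (by simp)
  rw [toDigits_eq_binChars] at hb
  rcases mem_binChars m 'b' hb with h' | h' <;> simp at h'

theorem strip0b_eq (v : Int) :
    PySem.Chars.replace (PySem.Int.toBinChars0b v) ['0', 'b'] []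
      = PySem.Int.toBinChars v := by
  rw [replace_eq_replSpec _ _ _ (by simp)]
  unfold PySem.Int.toBinChars0b PySem.Int.toBinChars
  by_cases hv : v < 0
  · simp only [hv, if_true]
    rw [replSpec, dif_neg (by simp [List.isPrefixOf])]
    rw [replSpec, dif_pos (by simp [List.isPrefixOf])]
    simpa using replSpec_of_not_infix _ [] _ (no_b_infix v.natAbs)
  · simp only [hv, if_false]
    rw [replSpec, dif_pos (by simp [List.isPrefixOf])]
    simpa using replSpec_of_not_infix _ [] _ (no_b_infix v.toNat)

-- B's renderer on a natural number is the rendered MSB-first digit list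
theorem renderB_nat (m : Nat) : renderB (m : Int) = (binChars m).map renderChar := by
  induction m using binChars.induct with
  | case1 m h2 =>
    rw [binChars, dif_pos h2]
    interval_cases m
    · rw [renderB]; norm_num [renderChar, Nat.digitChar]
    · rw [renderB]; norm_num [renderChar, Nat.digitChar]; decide
  | case2 m h2 ih =>
    rw [renderB, if_neg (by omega : ¬ ((m : Int) < 0)),
        if_neg (by exact_mod_cast (by omega : ¬ ((m : Int) < (2 : Nat))))]
    rw [show (2 : Int) = ((2 : Nat) : Int) from rfl, PySem.Int.floordiv_natCast m 2,
        show (1 : Int) = ((1 : Nat) : Int) from rfl, PySem.Int.band_natCast]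
    rw [binChars, dif_neg h2, List.map_append, ih]
    congr 1
    rw [Nat.and_one_is_mod]
    have : m % 2 = 0 ∨ m % 2 = 1 := by omega
    rcases this with h0 | h0 <;> simp [h0, renderChar, Nat.digitChar]

-- B's renderer is exactly the rendering of Python's format(v, 'b') characters
theorem renderB_eq (v : Int) : renderB v = (PySem.Int.toBinChars v).map renderChar := by
  unfold PySem.Int.toBinChars
  by_cases hv : v < 0
  · rw [renderB, if_pos hv, if_pos hv]
    rw [show -v = ((v.natAbs : Nat) : Int) from by omega, renderB_nat, toDigits_eq_binChars]
    rfl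
  · rw [if_neg hv]
    rw [show v = ((v.toNat : Nat) : Int) from by omega, renderB_nat, toDigits_eq_binChars,
        Int.toNat_natCast]

-- one row: A's string pipeline equals B's padded recursive rendering
theorem row_eq (n v : Int) :
    PySem.Str.replace (PySem.Str.replace
        (pyRjust (PySem.Str.replace (PySem.Int.pyBin v) "0b" "") n '0') "1" "#") "0" " "
      = String.ofList (List.replicate (n - ((renderB v).length : Int)).toNat ' ' ++ renderB v) := by
  apply String.toList_inj.mp
  rw [PySem.Str.toList_replace, PySem.Str.toList_replace]
  rw [replace_eq_replSpec _ _ _ (by simp), replace_eq_replSpec _ _ _ (by simp)]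
  rw [show ("0" : String).toList = ['0'] from rfl, show ("1" : String).toList = ['1'] from rfl,
      show (" " : String).toList = [' '] from rfl, show ("#" : String).toList = ['#'] from rfl]
  rw [replSpec_single, replSpec_single, List.map_map]
  have hmap : ∀ l : List Char,
      l.map ((fun c => if c = '0' then ' ' else c) ∘ (fun c => if c = '1' then '#' else c))
        = l.map renderChar := fun l => List.map_congr_left (fun c _ => render_comp c)
  rw [hmap]
  unfold pyRjust
  rw [PySem.Str.toList_replace]
  rw [show ("0b" : String).toList = ['0', 'b'] from rfl, show ("" : String).toList = [] from rfl]
  rw [PySem.Int.toList_pyBin, strip0b_eq]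
  rw [String.toList_ofList, String.toList_ofList]
  rw [List.map_append, List.map_replicate]
  rw [show renderChar '0' = ' ' from rfl]
  rw [renderB_eq]
  congr 2
  rw [List.length_map]
  omega

-- ===== VERDICT (by name: the statement is the Claim_ definition above) =====
theorem solution_spec : Claim_equal_solution := by
  unfold Claim_equal_solution
  intro n arr1 arr2 _ hpre
  obtain ⟨h1, h2⟩ := hpre
  unfold Spec_solution solution solution_alt
  simp only [PySem.List.foldl_append_singleton_eq_map, List.nil_append]
  apply List.map_congr_left
  intro i hi
  rw [PySem.List.mem_pyRange_one] at hi
  have hi1 : i < (arr1.length : Int) := by omega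
  have hi2 : i < (arr2.length : Int) := by omega
  have hiz : i < (((arr1.zip arr2).map
      (fun x => PySem.Int.pyBin (PySem.Int.bor x.1 x.2))).length : Int) := by
    simp [List.length_zip]; omega
  rw [PySem.List.pyGetD_eq_getElem _ _ hi.1 hiz,
      PySem.List.pyGetD_eq_getElem _ _ hi.1 hi1,
      PySem.List.pyGetD_eq_getElem _ _ hi.1 hi2]
  rw [List.getElem_map, List.getElem_zip]
  exact row_eq n _
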